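-- pv_equiv track=rewrite | github.com/Medokin8/multivariant-object-detection-with-occupancy-grid-map | dynamic_cell_detection.py | find_most_similar_segment
-- ===== SOURCE A (Python) =====
-- def find_most_similar_segment(unique_point, source_segment, segments):
--     # Compute similarity based on the number of common points
--     source_points_set = set(tuple(point) for point in source_segment)
--     max_similarity = 0
--     most_similar_segment = None
--     for segment in segments:
--         common_points = source_points_set.intersection(set(tuple(point) for point in segment))
--         similarity = len(common_points)
--         if similarity > max_similarity:
--             max_similarity = similarity
--             most_similar_segment = segment
--     return most_similar_segment
-- ===== SOURCE B (Python) =====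
-- def find_most_similar_segment(unique_point, source_segment, segments):
--     # Inverted index: point -> set of indices of segments containing that point.
--     index = {}
--     for i, segment in enumerate(segments):
--         for point in segment:
--             index.setdefault(tuple(point), set()).add(i)
--     # Tally, per segment, how many distinct source points it shares.
--     tallies = [0] * len(segments)
--     for point in set(tuple(p) for p in source_segment):
--         for i in index.get(point, ()):
--             tallies[i] += 1
--     # First segment with a strictly larger tally than any before; None if all are 0.
--     best_count = 0
--     best = None
--     for tally, segment in zip(tallies, segments):
--         if tally > best_count:
--             best_count = tally
--             best = segment
--     return best
-- ===== Notes on version B (the rewrite author's own statement) =====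
-- stated objective: alternative
-- what changed: Replaces per-segment set intersections with an inverted index from point to segment indices plus a source-point-driven tally array, then a linear scan of tallies.
import Mathlib
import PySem

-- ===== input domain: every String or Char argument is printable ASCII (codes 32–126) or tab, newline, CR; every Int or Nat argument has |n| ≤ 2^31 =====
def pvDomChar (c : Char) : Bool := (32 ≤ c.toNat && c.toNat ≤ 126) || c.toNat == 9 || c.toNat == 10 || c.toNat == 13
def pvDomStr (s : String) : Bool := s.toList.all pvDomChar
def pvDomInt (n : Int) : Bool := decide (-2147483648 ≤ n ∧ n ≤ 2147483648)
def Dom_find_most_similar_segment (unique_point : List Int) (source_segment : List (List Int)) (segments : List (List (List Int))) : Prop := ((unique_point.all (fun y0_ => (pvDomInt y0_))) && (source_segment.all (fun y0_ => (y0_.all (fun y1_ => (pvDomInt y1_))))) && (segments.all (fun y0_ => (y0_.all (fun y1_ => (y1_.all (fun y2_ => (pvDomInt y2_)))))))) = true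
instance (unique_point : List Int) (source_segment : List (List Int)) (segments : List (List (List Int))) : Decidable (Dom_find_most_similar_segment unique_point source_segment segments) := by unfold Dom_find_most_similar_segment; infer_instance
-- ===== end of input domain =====

-- B replaces A's per-segment set intersections by an inverted index (point -> set of
-- segment indices) and a source-point-driven tally array; same asymptotic cost ("alternative").

-- ===== PORT A =====
def find_most_similar_segment (unique_point : List Int) (source_segment : List (List Int)) (segments : List (List (List Int))) : Option (List (List Int)) :=
  let source_points_set : PySem.Set (List Int) := PySem.Set.ofList source_segment
  -- loop: state = (max_similarity, most_similar_segment)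
  (segments.foldl
    (fun (st : Int × Option (List (List Int))) segment =>
      let common_points : PySem.Set (List Int) :=
        PySem.Set.inter source_points_set (PySem.Set.ofList segment)
      let similarity : Int := common_points.length
      if st.1 < similarity then (similarity, some segment) else st)
    ((0 : Int), none)).2

-- ===== PORT B =====
-- tallies[i] += 1  (every stored index i satisfies 0 ≤ i < len tallies, so this is exact)
def pvBump (t : List Int) (i : Int) : List Int :=
  t.set i.toNat (t.getD i.toNat 0 + 1)

-- index.setdefault(tuple(point), set()).add(i) over all i, segment
def pvIndex (segments : List (List (List Int))) : PySem.Dict (List Int) (PySem.Set Int) :=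
  (PySem.List.enumerate segments).foldl
    (fun d p => p.2.foldl (fun d point => d.insert point (PySem.Set.add (d.getD point []) p.1)) d)
    PySem.Dict.empty

def find_most_similar_segment_alt (unique_point : List Int) (source_segment : List (List Int)) (segments : List (List (List Int))) : Option (List (List Int)) :=
  let index := pvIndex segments
  let tallies : List Int :=
    (PySem.Set.ofList source_segment).foldl
      (fun t point => (index.getD point []).foldl pvBump t)
      (List.replicate segments.length (0 : Int))
  ((tallies.zip segments).foldl
    (fun (st : Int × Option (List (List Int))) p =>
      if st.1 < p.1 then (p.1, some p.2) else st)
    ((0 : Int), none)).2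

-- ===== PRECONDITION & SPEC =====
def Spec_find_most_similar_segment (unique_point : List Int) (source_segment : List (List Int)) (segments : List (List (List Int))) (out : Option (List (List Int))) : Prop := out = find_most_similar_segment_alt unique_point source_segment segments
instance (unique_point : List Int) (source_segment : List (List Int)) (segments : List (List (List Int))) (out : Option (List (List Int))) : Decidable (Spec_find_most_similar_segment unique_point source_segment segments out) := by unfold Spec_find_most_similar_segment; infer_instance

-- ===== CLAIM (what is proved, stated in full; the proofs are below) =====
def Claim_equal_find_most_similar_segment : Prop := ∀ (unique_point : List Int) (source_segment : List (List Int)) (segments : List (List (List Int))), Dom_find_most_similar_segment unique_point source_segment segments → Spec_find_most_similar_segment unique_point source_segment segments (find_most_similar_segment unique_point source_segment segments)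

-- ===== LEMMAS AND PROOFS =====

-- the one-segment step of pvIndex: what it does to each stored set
lemma pvIndex_step (seg : List (List Int)) (i : Int) (d : PySem.Dict (List Int) (PySem.Set Int)) (pt : List Int) :
    (seg.foldl (fun d point => d.insert point (PySem.Set.add (d.getD point []) i)) d).getD pt []
      = if pt ∈ seg then PySem.Set.add (d.getD pt []) i else d.getD pt [] := by
  induction seg generalizing d with
  | nil => simp
  | cons q seg ih =>
    simp only [List.foldl_cons, ih]
    by_cases hq : pt = q
    · subst hq; simp [pysem]
    · have h2 : (d.insert q (PySem.Set.add (d.getD q []) i)).getD pt [] = d.getD pt [] := by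
        simp [pysem]; intro h; exact absurd h hq
      simp [h2, hq, List.mem_cons]

-- membership in the index: j is recorded for pt iff some segment (numbered from s) contains pt
lemma pvIndex_mem (segs : List (List (List Int))) (s : Int) (d : PySem.Dict (List Int) (PySem.Set Int)) (pt : List Int) (j : Int) :
    j ∈ ((PySem.List.enumerate segs s).foldl
        (fun d p => p.2.foldl (fun d point => d.insert point (PySem.Set.add (d.getD point []) p.1)) d) d).getD pt []
      ↔ j ∈ d.getD pt [] ∨ ∃ k : Nat, ∃ _ : k < segs.length, j = s + k ∧ pt ∈ segs[k] := by
  induction segs generalizing s d with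
  | nil => simp [PySem.List.enumerate_nil]
  | cons a l ih =>
    rw [PySem.List.enumerate_cons]
    simp only [List.foldl_cons]
    rw [ih, pvIndex_step]
    constructor
    · rintro (h | ⟨k, hk, rfl, hmem⟩)
      · by_cases ha : pt ∈ a
        · simp [ha, PySem.Set.mem_add] at h
          rcases h with h | rfl
          · exact Or.inl h
          · exact Or.inr ⟨0, by simp, by simp, ha⟩
        · simp [ha] at h; exact Or.inl h
      · exact Or.inr ⟨k + 1, by simpa using hk, by push_cast; ring, by simpa using hmem⟩
    · rintro (h | ⟨k, hk, rfl, hmem⟩)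
      · left; split <;> simp [PySem.Set.mem_add, h]
      · cases k with
        | zero =>
          left; simp at hmem ⊢
          simp [hmem, PySem.Set.mem_add]
        | succ k =>
          right
          exact ⟨k, by simpa using hk, by push_cast; ring, by simpa using hmem⟩

lemma pvIndex_nodup (segs : List (List (List Int))) (s : Int) (d : PySem.Dict (List Int) (PySem.Set Int)) (pt : List Int)
    (hd : ∀ q, (d.getD q []).Nodup) :
    (((PySem.List.enumerate segs s).foldl
        (fun d p => p.2.foldl (fun d point => d.insert point (PySem.Set.add (d.getD point []) p.1)) d) d).getD pt []).Nodup := by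
  induction segs generalizing s d with
  | nil => simpa [PySem.List.enumerate_nil] using hd pt
  | cons a l ih =>
    rw [PySem.List.enumerate_cons]
    simp only [List.foldl_cons]
    apply ih
    intro q
    rw [pvIndex_step]
    split
    · exact PySem.Set.nodup_add _ _ (hd q)
    · exact hd q

lemma pvIndex_mem' (segs : List (List (List Int))) (pt : List Int) (j : Int) :
    j ∈ (pvIndex segs).getD pt [] ↔ ∃ k : Nat, ∃ _ : k < segs.length, j = (k : Int) ∧ pt ∈ segs[k] := by
  rw [pvIndex, pvIndex_mem]
  simp [PySem.Dict.empty, PySem.Dict.getD, PySem.Dict.get?]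

-- the index stores each applicable segment number exactly once
lemma pvIndex_count (segs : List (List (List Int))) (pt : List Int) (j : Nat) (hj : j < segs.length) :
    ((pvIndex segs).getD pt []).count (j : Int) = if pt ∈ segs[j] then 1 else 0 := by
  have hnd : ((pvIndex segs).getD pt []).Nodup :=
    pvIndex_nodup segs 0 PySem.Dict.empty pt
      (by intro q; simp [PySem.Dict.empty, PySem.Dict.getD, PySem.Dict.get?])
  by_cases hmem : pt ∈ segs[j]
  · rw [if_pos hmem]
    exact List.count_eq_one_of_mem hnd ((pvIndex_mem' segs pt j).2 ⟨j, hj, rfl, hmem⟩)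
  · rw [if_neg hmem, List.count_eq_zero]
    intro h
    obtain ⟨k, hk, hkj, hm⟩ := (pvIndex_mem' segs pt _).1 h
    have : k = j := by omega
    subst this; exact hmem hm

-- effect of bumping along a list of in-range indices
lemma foldl_pvBump (lst : List Int) (t : List Int)
    (hl : ∀ i ∈ lst, 0 ≤ i ∧ i.toNat < t.length) :
    ((lst.foldl pvBump t).length = t.length) ∧
    ∀ j : Nat, j < t.length → (lst.foldl pvBump t).getD j 0 = t.getD j 0 + (lst.count (j : Int) : Int) := by
  induction lst generalizing t with
  | nil => simp
  | cons i lst ih =>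
    obtain ⟨hi0, hilt⟩ := hl i (List.mem_cons_self ..)
    have hlen : (pvBump t i).length = t.length := by simp [pvBump]
    have hrest : ∀ x ∈ lst, 0 ≤ x ∧ x.toNat < (pvBump t i).length := by
      intro x hx; rw [hlen]; exact hl x (List.mem_cons_of_mem _ hx)
    obtain ⟨ihlen, ihget⟩ := ih (pvBump t i) hrest
    refine ⟨by simp [List.foldl_cons, ihlen, hlen], ?_⟩
    intro j hj
    rw [List.foldl_cons, ihget j (by omega)]
    have hcount : (i :: lst).count (j : Int) = lst.count (j : Int) + (if i = (j : Int) then 1 else 0) := by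
      simp [List.count_cons]
    rw [hcount]
    by_cases hij : i = (j : Int)
    · simp [pvBump, List.getD, List.getElem?_set_self (by omega), hij]
      ring
    · have hne : i.toNat ≠ j := by omega
      simp [pvBump, List.getD, List.getElem?_set_ne hne, hij]

-- the tallies: entry j counts how many of the points of ps lie in segment j
lemma tallies_fold (segs : List (List (List Int))) (ps : List (List Int)) (t : List Int)
    (ht : t.length = segs.length) :
    ((ps.foldl (fun t pt => ((pvIndex segs).getD pt []).foldl pvBump t) t).length = t.length) ∧
    ∀ j : Nat, j < segs.length →
      (ps.foldl (fun t pt => ((pvIndex segs).getD pt []).foldl pvBump t) t).getD j 0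
        = t.getD j 0 + (ps.countP (fun pt => decide (pt ∈ segs.getD j [])) : Int) := by
  induction ps generalizing t with
  | nil => simp
  | cons p ps ih =>
    have hrange : ∀ i ∈ (pvIndex segs).getD p [], 0 ≤ i ∧ i.toNat < t.length := by
      intro i hi
      obtain ⟨k, hk, rfl, _⟩ := (pvIndex_mem' segs p i).1 hi
      constructor <;> omega
    obtain ⟨blen, bget⟩ := foldl_pvBump _ t hrange
    obtain ⟨ihlen, ihget⟩ := ih (((pvIndex segs).getD p []).foldl pvBump t) (by omega)
    refine ⟨by rw [List.foldl_cons, ihlen, blen], ?_⟩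
    intro j hj
    rw [List.foldl_cons, ihget j hj, bget j (by omega), pvIndex_count segs p j hj]
    have hgd : segs.getD j [] = segs[j] := List.getD_eq_getElem segs [] hj
    rw [List.countP_cons]
    simp only [hgd]
    by_cases hm : p ∈ segs[j] <;> simp [hm] <;> try ring

-- A's similarity for a segment is the same count of distinct source points
lemma sim_eq (source_segment seg : List (List Int)) :
    ((PySem.Set.inter (PySem.Set.ofList source_segment) (PySem.Set.ofList seg)).length : Int)
      = ((PySem.Set.ofList source_segment).countP (fun pt => decide (pt ∈ seg)) : Int) := by
  have h : PySem.Set.inter (PySem.Set.ofList source_segment) (PySem.Set.ofList seg)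
      = (PySem.Set.ofList source_segment).filter (fun x => (PySem.Set.ofList seg).contains x) := rfl
  rw [h, ← List.countP_eq_length_filter]
  congr 1
  apply List.countP_congr
  intro pt _
  simp [PySem.Set.mem_ofList]

-- the two final scans coincide once tallies = map of similarities
lemma final_scan (segs : List (List (List Int))) (f : List (List Int) → Int) (st : Int × Option (List (List Int))) :
    (((segs.map f).zip segs).foldl
        (fun (st : Int × Option (List (List Int))) p => if st.1 < p.1 then (p.1, some p.2) else st) st)
      = segs.foldl (fun (st : Int × Option (List (List Int))) seg => if st.1 < f seg then (f seg, some seg) else st) st := by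
  induction segs generalizing st with
  | nil => rfl
  | cons a l ih => simp [List.foldl, ih]

-- ===== VERDICT (by name: the statement is the Claim_ definition above) =====
theorem find_most_similar_segment_spec : Claim_equal_find_most_similar_segment := by
  intro unique_point source_segment segments _
  simp only [Spec_find_most_similar_segment, find_most_similar_segment, find_most_similar_segment_alt]
  have htal :
      ((PySem.Set.ofList source_segment).foldl
          (fun t point => ((pvIndex segments).getD point []).foldl pvBump t)
          (List.replicate segments.length (0 : Int)))
        = segments.map (fun seg => ((PySem.Set.ofList source_segment).countP (fun pt => decide (pt ∈ seg)) : Int)) := by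
    obtain ⟨hlen, hget⟩ := tallies_fold segments (PySem.Set.ofList source_segment)
      (List.replicate segments.length (0 : Int)) (by simp)
    apply List.ext_getElem
    · simp [hlen]
    · intro j hj hj'
      have hjlt : j < segments.length := by simpa using hj'
      have h1 := hget j hjlt
      rw [List.getD_eq_getElem _ 0 hj] at h1
      rw [h1]
      simp [List.getD, List.getElem?_eq_getElem hjlt]
  rw [htal, final_scan]
  congr 1
  apply PySem.List.foldl_congr_mem
  intro acc seg _
  rw [sim_eq]
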